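-- pv_equiv track=rewrite | github.com/eroge-69/PyToExe | python-files/combinaciones.py | no_tres_consecutivos
-- ===== SOURCE A (Python) =====
-- def no_tres_consecutivos(s):
--     for i in range(len(s) - 2):
--         tipo1 = s[i].isalpha()
--         tipo2 = s[i+1].isalpha()
--         tipo3 = s[i+2].isalpha()
--         if tipo1 == tipo2 == tipo3:
--             return False
--     return True
-- ===== SOURCE B (Python) =====
-- def no_tres_consecutivos(s):
--     cur = None
--     run = 0
--     for ch in s:
--         t = ch.isalpha()
--         if t == cur:
--             run += 1
--             if run == 3:
--                 return False
--         else: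
--             cur = t
--             run = 1
--     return True
-- ===== Notes on version B (the rewrite author's own statement) =====
-- stated objective: idiomatic
-- what changed: B does a single pass maintaining the current character-type run length (reset on type change, fail at run 3) instead of testing every overlapping index triple s[i],s[i+1],s[i+2].
import Mathlib
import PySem

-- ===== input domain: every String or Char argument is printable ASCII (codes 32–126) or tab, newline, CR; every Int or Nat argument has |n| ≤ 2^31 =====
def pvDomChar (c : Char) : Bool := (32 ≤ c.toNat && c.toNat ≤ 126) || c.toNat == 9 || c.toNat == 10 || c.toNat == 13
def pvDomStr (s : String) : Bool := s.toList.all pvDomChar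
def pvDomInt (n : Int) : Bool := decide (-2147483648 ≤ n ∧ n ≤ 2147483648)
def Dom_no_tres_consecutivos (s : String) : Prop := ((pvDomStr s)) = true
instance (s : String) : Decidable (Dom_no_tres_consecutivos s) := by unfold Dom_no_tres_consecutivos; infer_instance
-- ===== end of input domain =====

-- B replaces A's scan over all overlapping index triples by a single pass that tracks the
-- current character-type run length (idiomatic run-length formulation); same O(n) cost.


-- ===== PORT A =====
-- A's loop 'for i in range(len(s)-2): test s[i],s[i+1],s[i+2]' is realized as structural
-- recursion on the suffix starting at i: each step reads the same three characters in the
-- same order and tests the same chained equality, returning False early exactly as A does.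
def noTresLoopA : List Char → Bool
  | a :: b :: c :: rest =>
    let tipo1 := PySem.Chars.isalpha a
    let tipo2 := PySem.Chars.isalpha b
    let tipo3 := PySem.Chars.isalpha c
    if tipo1 == tipo2 && tipo2 == tipo3 then false else noTresLoopA (b :: c :: rest)
  | _ => true

def no_tres_consecutivos (s : String) : Bool := noTresLoopA s.toList

-- ===== PORT B =====
-- cur : Option Bool is Python's 'cur' (None initially); run is the current run length.
def noTresLoopB : List Char → Option Bool → Nat → Bool
  | [], _, _ => true
  | ch :: rest, cur, run =>
    let t := PySem.Chars.isalpha ch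
    if some t == cur then
      if run + 1 == 3 then false else noTresLoopB rest cur (run + 1)
    else
      noTresLoopB rest (some t) 1

def no_tres_consecutivos_alt (s : String) : Bool := noTresLoopB s.toList none 0

-- ===== PRECONDITION & SPEC =====
def Spec_no_tres_consecutivos (s : String) (out : Bool) : Prop := out = no_tres_consecutivos_alt s
instance (s : String) (out : Bool) : Decidable (Spec_no_tres_consecutivos s out) := by unfold Spec_no_tres_consecutivos; infer_instance

-- ===== CLAIM (what is proved, stated in full; the proofs are below) =====
def Claim_equal_no_tres_consecutivos : Prop := ∀ (s : String), Dom_no_tres_consecutivos s → Spec_no_tres_consecutivos s (no_tres_consecutivos s)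

-- ===== LEMMAS AND PROOFS =====

-- when the first two characters differ in type, A's scan never fails on the first window
theorem loopA_skip (b c : Char) (rest : List Char)
    (h : PySem.Chars.isalpha b ≠ PySem.Chars.isalpha c) :
    noTresLoopA (b :: c :: rest) = noTresLoopA (c :: rest) := by
  cases rest with
  | nil => rfl
  | cons d rest' =>
    simp only [noTresLoopA]
    rw [if_neg]
    simp [h]

-- joint invariant: run-state (some (type a), 1) after reading a, and (some (type b), 2)
-- after reading a, b of equal type, agree with A's triple scan on the remaining suffix
theorem loopB_inv (cs : List Char) :
    (∀ a, noTresLoopB cs (some (PySem.Chars.isalpha a)) 1 = noTresLoopA (a :: cs)) ∧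
    (∀ a b, PySem.Chars.isalpha a = PySem.Chars.isalpha b →
      noTresLoopB cs (some (PySem.Chars.isalpha b)) 2 = noTresLoopA (a :: b :: cs)) := by
  induction cs with
  | nil => exact ⟨fun a => rfl, fun a b _ => rfl⟩
  | cons c rest ih =>
    constructor
    · intro a
      by_cases h : PySem.Chars.isalpha c = PySem.Chars.isalpha a
      · simp only [noTresLoopB]
        rw [if_pos (by simp [h])]
        rw [if_neg (by decide)]
        rw [← h]
        exact ih.2 a c h.symm
      · simp only [noTresLoopB]
        rw [if_neg (by simp [h])]
        rw [ih.1 c, loopA_skip a c rest (fun hh => h hh.symm)]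
    · intro a b hab
      by_cases h : PySem.Chars.isalpha c = PySem.Chars.isalpha b
      · simp only [noTresLoopB]
        rw [if_pos (by simp [h])]
        rw [if_pos (by decide)]
        simp only [noTresLoopA]
        rw [if_pos (by simp [hab, h.symm])]
      · simp only [noTresLoopB]
        rw [if_neg (by simp [h])]
        rw [ih.1 c]
        simp only [noTresLoopA]
        rw [if_neg (by simp; intro _ hh; exact h hh.symm)]
        rw [loopA_skip b c rest (fun hh => h hh.symm)]

-- ===== VERDICT (by name: the statement is the Claim_ definition above) =====
theorem no_tres_consecutivos_spec : Claim_equal_no_tres_consecutivos := by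
  intro s _
  unfold Spec_no_tres_consecutivos no_tres_consecutivos no_tres_consecutivos_alt
  cases hcs : s.toList with
  | nil => rfl
  | cons a rest =>
    simp only [noTresLoopB]
    rw [if_neg (by simp)]
    exact ((loopB_inv rest).1 a).symm
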